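-- pv_equiv track=rewrite | github.com/zalandemeter12/Sideslip-Estimation | main.py | get_min_dists
-- ===== SOURCE A (Python) =====
-- def get_min_dists(dists):
--     min_idxes = []
--     min_dists = []
--     for i in range(len(dists)):
--         tmp_dist = min(dists[i])
--         min_idxes.append(dists[i].index(tmp_dist))
--         min_dists.append(tmp_dist)
--
--     return min_idxes, min_dists
-- ===== SOURCE B (Python) =====
-- def get_min_dists(dists):
--     heads = [sorted(enumerate(row), key=lambda p: p[1])[0] for row in dists]
--     return [i for i, _ in heads], [v for _, v in heads]
-- ===== Notes on version B (the rewrite author's own statement) =====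
-- stated objective: alternative
-- what changed: Instead of scanning each row twice with min() and .index(), B stably sorts each row's (index, value) pairs by value and takes the head of the sorted list (stability makes it the first-occurrence argmin), then projects the two result lists; it trades A's linear scans for a sort.
import Mathlib
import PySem

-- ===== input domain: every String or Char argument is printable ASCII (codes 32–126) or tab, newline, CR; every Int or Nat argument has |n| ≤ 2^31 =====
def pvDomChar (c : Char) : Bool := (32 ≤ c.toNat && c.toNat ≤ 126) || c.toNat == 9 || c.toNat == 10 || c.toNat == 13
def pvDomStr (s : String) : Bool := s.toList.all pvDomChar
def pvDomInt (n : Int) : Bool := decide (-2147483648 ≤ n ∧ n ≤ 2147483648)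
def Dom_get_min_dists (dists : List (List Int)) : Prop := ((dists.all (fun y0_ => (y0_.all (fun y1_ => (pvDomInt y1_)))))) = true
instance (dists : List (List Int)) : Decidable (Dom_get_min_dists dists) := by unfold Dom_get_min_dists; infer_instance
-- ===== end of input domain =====

-- B finds each row's (first index, min) by STABLY SORTING the row's (index, value) pairs
-- by value and taking the head, instead of A's min() plus a second .index() scan
-- (alternative algorithm: sort-then-take-head vs linear scans; not claimed faster).


-- ===== PORT A =====
-- loop over rows; min(dists[i]) then dists[i].index(tmp_dist); appends to two lists.
-- On an empty row Python's min raises ValueError: excluded by Pre_; the 'none' branch is unreachable there.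
def get_min_dists (dists : List (List Int)) : List Int × List Int :=
  dists.foldl
    (fun acc row =>
      match PySem.List.min? row (fun x => x) with
      | none => acc
      | some tmp =>
          (acc.1 ++ [(((PySem.List.index? row tmp).getD 0 : Nat) : Int)], acc.2 ++ [tmp]))
    ([], [])

-- ===== PORT B =====
-- sorted(enumerate(row), key=lambda p: p[1])[0]: stable sort by value, take the head pair.
-- '[0]' on the sorted list is head?.getD; Pre_ guarantees the row (hence the sorted list) is nonempty.
def pvRowHead (row : List Int) : Int × Int :=
  ((PySem.List.sorted (PySem.List.enumerate row) (fun p => p.2)).head?).getD (0, 0)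

def get_min_dists_alt (dists : List (List Int)) : List Int × List Int :=
  let heads := dists.map pvRowHead
  (heads.map (fun p => p.1), heads.map (fun p => p.2))

-- ===== PRECONDITION & SPEC =====
-- Pre_ excludes inputs containing an empty row: there Python A raises ValueError from min()
-- (and B raises IndexError from [0]).
def Pre_get_min_dists (dists : List (List Int)) : Prop := ∀ row ∈ dists, row ≠ []
instance (dists : List (List Int)) : Decidable (Pre_get_min_dists dists) := by unfold Pre_get_min_dists; infer_instance
def pvWitness_get_min_dists : List (List Int) := [[3, 1, 2, 1], [5], [-2, -2, 0]]

def Spec_get_min_dists (dists : List (List Int)) (out : List Int × List Int) : Prop := out = get_min_dists_alt dists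
instance (dists : List (List Int)) (out : List Int × List Int) : Decidable (Spec_get_min_dists dists out) := by unfold Spec_get_min_dists; infer_instance

-- ===== CLAIM (what is proved, stated in full; the proofs are below) =====
def Claim_equal_get_min_dists : Prop := ∀ (dists : List (List Int)), Dom_get_min_dists dists → Pre_get_min_dists dists → Spec_get_min_dists dists (get_min_dists dists)

-- ===== LEMMAS AND PROOFS =====

-- head of an insertBy: x goes in front iff it beats the old head (strict comparison).
lemma pvHead_insertBy {α : Type} (b : α → α → Bool) (x : α) (ys : List α) :
    (PySem.List.insertBy b x ys).head? =
      some (match ys with | [] => x | y :: _ => if b x y then x else y) := by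
  cases ys with
  | nil => simp [PySem.List.insertBy]
  | cons y ys => by_cases h : b x y <;> simp [PySem.List.insertBy, h]

-- head of the insertion-sort fold = the running first-minimum fold over the heads.
lemma pvHead_foldl_insert {α κ : Type} [LinearOrder κ] (key : α → κ)
    (xs : List α) (acc : List α) :
    (xs.foldl (fun acc x => PySem.List.insertBy (fun a b => decide (key a < key b)) x acc) acc).head?
      = xs.foldl
          (fun m x => match m with
            | none => some x
            | some m => if key x < key m then some x else some m)
          acc.head? := by
  induction xs generalizing acc with
  | nil => rfl
  | cons x xs ih =>
    rw [List.foldl_cons, List.foldl_cons, ih]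
    congr 1
    cases acc with
    | nil => simp [PySem.List.insertBy]
    | cons y ys =>
      rw [pvHead_insertBy]
      by_cases h : key x < key y <;> simp [h]

-- head of a stable sort = the FIRST minimal element (Python's min with that key).
lemma pvHead_sorted_min {α κ : Type} [LinearOrder κ] (xs : List α) (key : α → κ) :
    (PySem.List.sorted xs key).head? = PySem.List.min? xs key := by
  rw [PySem.List.sorted_eq_foldl_insertBy]
  exact pvHead_foldl_insert key xs []

-- reference single-pass argmin: carries (first index j of the running min m, m) and the next index k
def pvRef (t : List Int) (j : Nat) (m : Int) (k : Nat) : Nat × Int :=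
  match t with
  | [] => (j, m)
  | x :: t' => if x < m then pvRef t' k x (k + 1) else pvRef t' j m (k + 1)

lemma pvRef_min (f : Option Int → Int → Option Int)
    (hf : ∀ m x, f (some m) x = if x < m then some x else some m)
    (t : List Int) (m : Int) (j k : Nat) :
    t.foldl f (some m) = some (pvRef t j m k).2 := by
  induction t generalizing m j k with
  | nil => simp [pvRef]
  | cons x t ih =>
    rw [List.foldl_cons, hf]
    by_cases h : x < m
    · rw [if_pos h]
      simpa [pvRef, h] using ih x k (k + 1)
    · rw [if_neg h]
      simpa [pvRef, h] using ih m j (k + 1)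

lemma pvRef_enum (f : Option (Int × Int) → Int × Int → Option (Int × Int))
    (hf : ∀ mm p, f (some mm) p = if p.2 < mm.2 then some p else some mm)
    (t : List Int) (j k : Nat) (m : Int) :
    (PySem.List.enumerate t (k : Int)).foldl f (some ((j : Int), m))
      = some (((pvRef t j m k).1 : Int), (pvRef t j m k).2) := by
  induction t generalizing j k m with
  | nil => simp [pvRef, PySem.List.enumerate_nil]
  | cons x t ih =>
    rw [PySem.List.enumerate_cons, List.foldl_cons, hf]
    by_cases h : x < m
    · rw [if_pos h]
      have := ih k (k + 1) x
      simp only [pvRef, h, if_true]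
      simpa using this
    · rw [if_neg h]
      have := ih j (k + 1) m
      simp only [pvRef, h, if_false]
      simpa using this

lemma pvRef_index (t : List Int) (pre : List Int) (j : Nat) (m : Int)
    (hidx : PySem.List.index? pre m = some j) (hmin : ∀ y ∈ pre, m ≤ y) :
    PySem.List.index? (pre ++ t) (pvRef t j m pre.length).2
      = some (pvRef t j m pre.length).1 := by
  induction t generalizing pre j m with
  | nil => simpa [pvRef] using hidx
  | cons x t ih =>
    have hsplit : pre ++ x :: t = (pre ++ [x]) ++ t := by simp
    have hlen : (pre ++ [x]).length = pre.length + 1 := by simp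
    by_cases h : x < m
    · have hnotmem : x ∉ pre := fun hx => absurd (hmin x hx) (by omega)
      have hidx' : PySem.List.index? (pre ++ [x]) x = some pre.length :=
        PySem.List.index?_append_singleton_self pre x hnotmem
      have hmin' : ∀ y ∈ pre ++ [x], x ≤ y := by
        intro y hy
        rcases List.mem_append.mp hy with hy | hy
        · exact le_of_lt (lt_of_lt_of_le h (hmin y hy))
        · simp at hy; omega
      have := ih (pre ++ [x]) pre.length x hidx' hmin'
      rw [hsplit]
      simpa [pvRef, h, hlen] using this
    · have hmem : m ∈ pre := by
        have : (PySem.List.index? pre m).isSome := by rw [hidx]; rfl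
        exact (PySem.List.index?_isSome_iff ..).mp this
      have hidx' : PySem.List.index? (pre ++ [x]) m = some j := by
        rw [PySem.List.index?_append_of_mem [x] hmem]; exact hidx
      have hmin' : ∀ y ∈ pre ++ [x], m ≤ y := by
        intro y hy
        rcases List.mem_append.mp hy with hy | hy
        · exact hmin y hy
        · simp at hy; omega
      have := ih (pre ++ [x]) j m hidx' hmin'
      rw [hsplit]
      simpa [pvRef, h, hlen] using this

lemma pvMin_cons (x : Int) (t : List Int) :
    PySem.List.min? (x :: t) (fun y => y) = some (pvRef t 0 x 1).2 := by
  unfold PySem.List.min?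
  rw [List.foldl_cons]
  exact pvRef_min _ (fun m y => rfl) t x 0 1

lemma pvRowHead_cons (x : Int) (t : List Int) :
    pvRowHead (x :: t) = (((pvRef t 0 x 1).1 : Int), (pvRef t 0 x 1).2) := by
  unfold pvRowHead
  rw [pvHead_sorted_min]
  unfold PySem.List.min?
  rw [PySem.List.enumerate_cons, List.foldl_cons]
  exact congrArg (fun o => Option.getD o ((0 : Int), (0 : Int)))
    (pvRef_enum _ (fun mm p => rfl) t 0 1 x)

lemma pvIdx_cons (x : Int) (t : List Int) :
    List.idxOf? (pvRef t 0 x 1).2 (x :: t) = some (pvRef t 0 x 1).1 := by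
  have := pvRef_index t [x] 0 x (PySem.List.index?_cons_self ..) (by simp)
  simpa [PySem.List.index?_eq_idxOf?] using this

lemma pvMain (dists : List (List Int)) (acc : List Int × List Int)
    (h : ∀ row ∈ dists, row ≠ []) :
    dists.foldl
      (fun acc row =>
        match PySem.List.min? row (fun x => x) with
        | none => acc
        | some tmp =>
            (acc.1 ++ [(((PySem.List.index? row tmp).getD 0 : Nat) : Int)], acc.2 ++ [tmp]))
      acc
    = (acc.1 ++ (dists.map pvRowHead).map (fun p => p.1),
       acc.2 ++ (dists.map pvRowHead).map (fun p => p.2)) := by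
  induction dists generalizing acc with
  | nil => simp
  | cons row rest ih =>
    obtain ⟨x, t, rfl⟩ := List.exists_cons_of_ne_nil (h row (by simp))
    rw [List.foldl_cons, pvMin_cons, ih _ (fun r hr => h r (by simp [hr]))]
    simp [pvIdx_cons, pvRowHead_cons]

-- ===== VERDICT (by name: the statement is the Claim_ definition above) =====
theorem get_min_dists_spec : Claim_equal_get_min_dists := by
  intro dists _ hpre
  unfold Spec_get_min_dists get_min_dists get_min_dists_alt
  rw [pvMain dists ([], []) hpre]
  simp
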